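-- pv_equiv track=rewrite | github.com/kentosoccer0502/study-notes | journal/2025/10/practice_codes/maxAsciiString.py | maxAsciiString
-- ===== SOURCE A (Python) =====
-- from typing import List
--
-- def maxAsciiString(stringList: List[str]) -> int:
--     sum_list: List[int] = []
--     for item in stringList:
--         item_sum = 0
--         for string in item:
--             item_sum += ord(string)
--         sum_list.append(item_sum)
--     return sum_list.index(max(sum_list))
-- ===== SOURCE B (Python) =====
-- from typing import List
--
-- def maxAsciiString(stringList: List[str]) -> int:
--     # single argmax pass: keep the best index and its running ASCII sum;
--     # update only on a strictly larger sum, so the first maximum wins ties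
--     best_index = 0
--     best_sum = sum(map(ord, stringList[0]))
--     for index, item in enumerate(stringList[1:], start=1):
--         s = sum(map(ord, item))
--         if s > best_sum:
--             best_index, best_sum = index, s
--     return best_index
-- ===== Notes on version B (the rewrite author's own statement) =====
-- stated objective: simpler
-- what changed: Replaces A's two-phase build-all-sums list plus index(max(...)) scan with a single argmax pass that keeps only the best index and its running ASCII sum (strict '>' update preserves first-max tie-breaking).
import Mathlib
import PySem

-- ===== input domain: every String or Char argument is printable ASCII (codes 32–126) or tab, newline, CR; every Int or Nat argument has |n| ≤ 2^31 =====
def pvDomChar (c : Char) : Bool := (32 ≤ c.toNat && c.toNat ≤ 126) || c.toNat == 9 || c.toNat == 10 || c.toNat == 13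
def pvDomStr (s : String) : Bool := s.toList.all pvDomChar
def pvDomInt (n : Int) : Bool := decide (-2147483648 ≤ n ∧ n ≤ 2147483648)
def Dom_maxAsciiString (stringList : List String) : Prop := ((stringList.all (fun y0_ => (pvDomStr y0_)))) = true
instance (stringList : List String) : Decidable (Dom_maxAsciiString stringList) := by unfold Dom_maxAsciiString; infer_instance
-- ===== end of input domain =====

-- B replaces A's build-all-sums list + index(max(...)) with a single argmax pass
-- keeping only the best index and its running ASCII sum (objective: simpler).

-- ===== PORT A =====
-- item_sum = 0; for string in item: item_sum += ord(string)
def pvSumA (item : String) : Int :=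
  item.toList.foldl (fun item_sum c => item_sum + (c.toNat : Int)) 0

def maxAsciiString (stringList : List String) : Int :=
  -- sum_list = []; for item in stringList: ... sum_list.append(item_sum)
  let sum_list : List Int := stringList.foldl (fun acc item => acc ++ [pvSumA item]) []
  -- return sum_list.index(max(sum_list)) ; max([]) raises ValueError → excluded by Pre_
  match PySem.List.max? sum_list (fun x => x) with
  | none => 0              -- unreachable under Pre_ (empty list: Python raises ValueError)
  | some m =>
    match PySem.List.index? sum_list m with
    | none => 0            -- unreachable: the maximum is a member of sum_list
    | some k => (k : Int)

-- ===== PORT B =====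
-- sum(map(ord, item))
def pvSumB (item : String) : Int :=
  (item.toList.map (fun c => (c.toNat : Int))).sum

def maxAsciiString_alt (stringList : List String) : Int :=
  match stringList with
  | [] => 0                -- unreachable under Pre_ (stringList[0]: Python raises IndexError)
  | h :: t =>
    -- for index, item in enumerate(stringList[1:], start=1): ...
    (((PySem.List.enumerate t 1).foldl
        (fun (best : Int × Int) p =>
          let s := pvSumB p.2
          if s > best.2 then (p.1, s) else best)
        (0, pvSumB h))).1

-- ===== PRECONDITION & SPEC =====
-- Pre_ excludes only the empty list, on which A raises ValueError (max of empty sequence)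
-- and B raises IndexError.
def Pre_maxAsciiString (stringList : List String) : Prop := stringList ≠ []
instance (stringList : List String) : Decidable (Pre_maxAsciiString stringList) := by
  unfold Pre_maxAsciiString; infer_instance

def pvWitness_maxAsciiString : List String := (["ab", "z"])

def Spec_maxAsciiString (stringList : List String) (out : Int) : Prop := out = maxAsciiString_alt stringList
instance (stringList : List String) (out : Int) : Decidable (Spec_maxAsciiString stringList out) := by unfold Spec_maxAsciiString; infer_instance

-- ===== CLAIM (what is proved, stated in full; the proofs are below) =====
def Claim_equal_maxAsciiString : Prop := ∀ (stringList : List String), Dom_maxAsciiString stringList → Pre_maxAsciiString stringList → Spec_maxAsciiString stringList (maxAsciiString stringList)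

-- ===== LEMMAS AND PROOFS =====

-- the two character-sum helpers agree
theorem pvSum_eq (s : String) : pvSumA s = pvSumB s := by
  simp only [pvSumA, pvSumB, List.sum_eq_foldl, List.foldl_map]

-- proof-side tail recursion equal to B's fold over enumerate
def pvGo (s bi bs : Int) : List Int → Int × Int
  | [] => (bi, bs)
  | y :: ys => if y > bs then pvGo (s + 1) s y ys else pvGo (s + 1) bi bs ys

-- max of x :: ys, as A's running foldl
def pvMx (x : Int) (ys : List Int) : Int := ys.foldl max x

-- index of the first maximum of x :: ys
def pvIx (x : Int) : List Int → Nat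
  | [] => 0
  | y :: ys => if x ≥ pvMx y ys then 0 else pvIx y ys + 1

theorem foldl_max_comm (ys : List Int) : ∀ a b, ys.foldl max (max a b) = max a (ys.foldl max b) := by
  induction ys with
  | nil => intro a b; simp
  | cons y ys ih =>
    intro a b
    simp only [List.foldl_cons, max_assoc]
    exact ih a (max b y)

theorem pvMx_cons (x y : Int) (ys : List Int) : pvMx x (y :: ys) = max x (pvMx y ys) := by
  simp only [pvMx, List.foldl_cons]
  exact foldl_max_comm ys x y

theorem pvIx_zero_mx (x : Int) (ys : List Int) (h : pvIx x ys = 0) : pvMx x ys = x := by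
  cases ys with
  | nil => simp [pvMx]
  | cons z zs =>
    simp only [pvIx] at h
    rw [pvMx_cons]
    split at h <;> omega

theorem pvIx_zero_of_ge (ys : List Int) (y bs : Int) (h : pvMx y ys ≤ bs) : pvIx bs ys = 0 := by
  cases ys with
  | nil => simp [pvIx]
  | cons z zs =>
    rw [pvMx_cons] at h
    simp only [pvIx]
    split
    · rfl
    · omega

theorem pvGo_spec (ys : List Int) : ∀ s bi bs,
    pvGo s bi bs ys =
      if pvIx bs ys = 0 then (bi, bs) else (s + (pvIx bs ys : Int) - 1, pvMx bs ys) := by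
  induction ys with
  | nil => intro s bi bs; simp [pvGo, pvIx]
  | cons y ys ih =>
    intro s bi bs
    have hmx : y ≤ pvMx y ys := (PySem.List.le_foldl_max ys y).1
    simp only [pvGo, pvIx, pvMx_cons]
    by_cases hy : y > bs
    · rw [if_pos hy, ih]
      have hge : ¬ bs ≥ pvMx y ys := by omega
      rw [if_neg hge]
      by_cases h0 : pvIx y ys = 0
      · have hyy := pvIx_zero_mx y ys h0
        rw [if_pos h0, if_neg (by omega : ¬ pvIx y ys + 1 = 0), h0, hyy]
        simp only [Prod.mk.injEq]
        constructor
        · push_cast; omega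
        · omega
      · rw [if_neg h0, if_neg (by omega : ¬ pvIx y ys + 1 = 0),
            max_eq_right (by omega : bs ≤ pvMx y ys)]
        simp only [Prod.mk.injEq]
        constructor
        · push_cast; omega
        · trivial
    · rw [if_neg hy, ih]
      by_cases hb : bs ≥ pvMx y ys
      · rw [if_pos (pvIx_zero_of_ge ys y bs hb), if_pos hb]
        simp
      · rw [if_neg hb]
        cases ys with
        | nil => simp [pvMx] at hb; omega
        | cons z zs =>
          rw [pvMx_cons] at hb hmx
          have hzz : ¬ bs ≥ pvMx z zs := by omega
          have hyz : ¬ y ≥ pvMx z zs := by omega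
          simp only [pvIx, pvMx_cons, if_neg hzz, if_neg hyz,
                     if_neg (by omega : ¬ pvIx z zs + 1 = 0)]
          rw [max_eq_right (by omega : bs ≤ pvMx z zs),
              max_eq_right (by omega : bs ≤ max y (pvMx z zs)),
              max_eq_right (by omega : y ≤ pvMx z zs)]
          congr 1
          push_cast
          omega

theorem index?_mx (ys : List Int) : ∀ x,
    PySem.List.index? (x :: ys) (pvMx x ys) = some (pvIx x ys) := by
  induction ys with
  | nil => intro x; simp [pvMx, pvIx]
  | cons y ys ih =>
    intro x
    rw [pvMx_cons]
    by_cases hx : x ≥ pvMx y ys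
    · rw [max_eq_left hx, PySem.List.index?_cons_self]
      simp [pvIx, hx]
    · rw [max_eq_right (by omega),
          PySem.List.index?_cons_of_ne (y :: ys) (by omega : x ≠ pvMx y ys), ih y]
      simp [pvIx, hx]

theorem enum_foldl (t : List String) : ∀ (s bi bs : Int),
    (PySem.List.enumerate t s).foldl
        (fun (best : Int × Int) p =>
          let s' := pvSumB p.2
          if s' > best.2 then (p.1, s') else best)
        (bi, bs)
      = pvGo s bi bs (t.map pvSumB) := by
  induction t with
  | nil => intro s bi bs; simp [PySem.List.enumerate_nil, pvGo]
  | cons h t ih =>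
    intro s bi bs
    rw [PySem.List.enumerate_cons]
    simp only [List.foldl_cons, List.map_cons, pvGo]
    by_cases hc : pvSumB h > bs
    · rw [if_pos hc, if_pos hc, ih]
    · rw [if_neg hc, if_neg hc, ih]

-- ===== VERDICT (by name: the statement is the Claim_ definition above) =====
theorem maxAsciiString_spec : Claim_equal_maxAsciiString := by
  intro l _ hpre
  unfold Spec_maxAsciiString
  cases l with
  | nil => exact absurd rfl hpre
  | cons h t =>
    have hsums : (h :: t).foldl (fun acc item => acc ++ [pvSumA item]) ([] : List Int)
        = pvSumB h :: t.map pvSumB := by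
      rw [PySem.List.foldl_append_singleton_eq_map]
      simp [pvSum_eq]
    have hA : maxAsciiString (h :: t) = ((pvIx (pvSumB h) (t.map pvSumB) : Nat) : Int) := by
      unfold maxAsciiString
      simp only [hsums, PySem.List.max?_id_cons]
      have hfold : (t.map pvSumB).foldl max (pvSumB h) = pvMx (pvSumB h) (t.map pvSumB) := rfl
      rw [hfold, index?_mx (t.map pvSumB) (pvSumB h)]
    have hB : maxAsciiString_alt (h :: t) = ((pvIx (pvSumB h) (t.map pvSumB) : Nat) : Int) := by
      simp only [maxAsciiString_alt]
      rw [enum_foldl t 1 0 (pvSumB h), pvGo_spec]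
      by_cases h0 : pvIx (pvSumB h) (t.map pvSumB) = 0
      · rw [if_pos h0, h0]; rfl
      · rw [if_neg h0]
        simp
    rw [hA, hB]
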